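-- pv_equiv track=rewrite | github.com/Yjiie/6-Laba | 6 Laba.py | generate_algorithmic_with_limit
-- ===== SOURCE A (Python) =====
-- def valid_path(path, area_limit):
--     for p in path:
--         if not (area_limit[0] <= p[0] <= area_limit[2] and area_limit[1] <= p[1] <= area_limit[3]):
--             return False
--     return True
--
-- def generate_algorithmic_with_limit(points, area_limit):
--     def generate(current, remaining):
--         if len(remaining) == 0:
--             if valid_path(current, area_limit):  # Проверка на корректность пути
--                 permutations.append(list(current))
--         else:
--             for i in range(len(remaining)):
--                 generate(current + [remaining[i]], remaining[:i] + remaining[i+1:])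
--
--     permutations = []
--     generate([], points)
--     return permutations
-- ===== SOURCE B (Python) =====
-- def generate_algorithmic_with_limit(points, area_limit):
--     # Validity is order-independent: check the points once up front instead of at every leaf.
--     for p in points:
--         if not (area_limit[0] <= p[0] <= area_limit[2] and area_limit[1] <= p[1] <= area_limit[3]):
--             return []
--
--     # Enumerate permutations by decoding each index k < n! through the factorial
--     # number system (Lehmer code): the k-th decoded permutation is exactly the k-th
--     # permutation in A's lexicographic-by-index recursion order.
--     n = len(points)
--     fact = [1] * (n + 1)
--     for i in range(1, n + 1):
--         fact[i] = fact[i - 1] * i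
--
--     result = []
--     for k in range(fact[n]):
--         pool = list(points)
--         perm = []
--         r = k
--         for i in range(n, 0, -1):
--             q, r = divmod(r, fact[i - 1])
--             perm.append(pool.pop(q))
--         result.append(perm)
--     return result
-- ===== Notes on version B (the rewrite author's own statement) =====
-- stated objective: alternative
-- what changed: B hoists the order-independent rectangle check out of the enumeration (one up-front pass, early [] on failure) and then enumerates permutations non-recursively by decoding every index k < n! through the factorial number system (Lehmer code, pool.pop per digit), instead of A's recursive prefix-extension generator that re-validates the whole path at every one of the n! leaves.
import Mathlib
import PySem

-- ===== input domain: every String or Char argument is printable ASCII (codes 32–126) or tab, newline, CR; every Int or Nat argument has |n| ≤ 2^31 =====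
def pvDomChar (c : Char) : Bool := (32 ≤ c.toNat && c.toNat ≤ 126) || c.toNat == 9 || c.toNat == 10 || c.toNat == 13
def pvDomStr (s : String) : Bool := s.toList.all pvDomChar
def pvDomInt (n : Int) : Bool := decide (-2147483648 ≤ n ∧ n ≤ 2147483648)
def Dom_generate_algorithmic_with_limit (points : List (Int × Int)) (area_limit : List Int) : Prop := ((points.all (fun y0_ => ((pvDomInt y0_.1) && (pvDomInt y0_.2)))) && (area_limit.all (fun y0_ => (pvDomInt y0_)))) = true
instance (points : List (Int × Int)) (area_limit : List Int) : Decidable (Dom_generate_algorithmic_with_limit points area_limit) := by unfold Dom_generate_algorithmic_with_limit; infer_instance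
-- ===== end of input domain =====

-- B hoists the order-independent point/rectangle check out of the enumeration (one up-front
-- pass, early [] on failure) and then enumerates the permutations non-recursively by decoding
-- every index k < n! through the factorial number system (Lehmer code), instead of A's
-- recursive prefix-extension generator with a validity test at every leaf.

-- ===== PORT A =====
-- area_limit[0] <= p[0] <= area_limit[2] and area_limit[1] <= p[1] <= area_limit[3]
-- (pyGet? = Python indexing; the none branch is Python's IndexError, excluded by Pre_)
def pvInRectA (area_limit : List Int) (p : Int × Int) : Bool :=
  match PySem.List.pyGet? area_limit 0, PySem.List.pyGet? area_limit 1,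
        PySem.List.pyGet? area_limit 2, PySem.List.pyGet? area_limit 3 with
  | some a0, some a1, some a2, some a3 =>
      decide (a0 ≤ p.1 ∧ p.1 ≤ a2 ∧ a1 ≤ p.2 ∧ p.2 ≤ a3)
  | _, _, _, _ => false   -- IndexError in Python: outside Pre_

def pvValidPath : List (Int × Int) → List Int → Bool
  | [], _ => true
  | p :: rest, area_limit =>
      if pvInRectA area_limit p then pvValidPath rest area_limit else false

-- the inner 'generate(current, remaining)' with the mutable 'permutations' list as accumulator;
-- i runs over range(len(remaining)) so remaining[i] is exact (no IndexError), and
-- remaining[:i] + remaining[i+1:] = take i ++ drop (i+1) since 0 ≤ i.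
def pvGenA (area_limit : List Int) (current remaining : List (Int × Int))
    (acc : List (List (Int × Int))) : List (List (Int × Int)) :=
  if _h : remaining.length = 0 then
    if pvValidPath current area_limit then acc ++ [current] else acc
  else
    (List.range remaining.length).attach.foldl
      (fun a i =>
        pvGenA area_limit
          (current ++ [remaining[i.1]'(by have := i.2; simpa [List.mem_range] using this)])
          (remaining.take i.1 ++ remaining.drop (i.1 + 1)) a)
      acc
termination_by remaining.length
decreasing_by
  have hi : i.1 < remaining.length := by have := i.2; simpa [List.mem_range] using this
  simp only [List.length_append, List.length_take, List.length_drop]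
  omega

def generate_algorithmic_with_limit (points : List (Int × Int)) (area_limit : List Int) :
    List (List (Int × Int)) :=
  pvGenA area_limit [] points []

-- ===== PORT B =====
def pvInRectB (area_limit : List Int) (p : Int × Int) : Bool :=
  match PySem.List.pyGet? area_limit 0, PySem.List.pyGet? area_limit 1,
        PySem.List.pyGet? area_limit 2, PySem.List.pyGet? area_limit 3 with
  | some a0, some a1, some a2, some a3 =>
      decide (a0 ≤ p.1 ∧ p.1 ≤ a2 ∧ a1 ≤ p.2 ∧ p.2 ≤ a3)
  | _, _, _, _ => false   -- IndexError in Python: outside Pre_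

-- Source B's fact table: fact[i] = fact[i-1] * i (all values are nonnegative counts, so Nat)
def pvFact : Nat → Nat
  | 0 => 1
  | i + 1 => pvFact i * (i + 1)

-- the inner 'for i in range(n, 0, -1): q, r = divmod(r, fact[i-1]); perm.append(pool.pop(q))'
-- loop of Source B; divmod on nonnegative ints is Nat division, pool.pop(q) is PySem.List.pop?
-- (q < len(pool) always holds here, so the none branch is unreachable).
def pvDecode : Nat → Nat → List (Int × Int) → List (Int × Int) → List (Int × Int)
  | 0, _, _, perm => perm
  | i + 1, r, pool, perm =>
      let q := r / pvFact i
      let r' := r % pvFact i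
      match PySem.List.pop? pool (q : Int) with
      | some (x, pool') => pvDecode i r' pool' (perm ++ [x])
      | none => perm   -- unreachable: q < pool.length throughout

def generate_algorithmic_with_limit_alt (points : List (Int × Int)) (area_limit : List Int) :
    List (List (Int × Int)) :=
  -- the 'for p in points: … return []' loop is the all-check; then decode k for k < n!
  if points.all (pvInRectB area_limit) then
    (List.range (pvFact points.length)).map (fun k => pvDecode points.length k points [])
  else []

-- ===== PRECONDITION & SPEC =====
-- pvRisky: with area_limit shorter than 4, the short-circuiting chain
-- 'area_limit[0] <= p[0] <= area_limit[2] and area_limit[1] <= p[1] <= area_limit[3]'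
-- reaches a missing index (IndexError) for this point instead of evaluating to False.
def pvRisky (area_limit : List Int) (p : Int × Int) : Bool :=
  if 4 ≤ area_limit.length then false
  else if area_limit.length = 0 then true
  else if area_limit.length ≤ 2 then decide (area_limit.getD 0 0 ≤ p.1)
  else decide (area_limit.getD 0 0 ≤ p.1 ∧ p.1 ≤ area_limit.getD 2 0 ∧ area_limit.getD 1 0 ≤ p.2)

-- Pre_ excludes exactly the inputs where Python A raises IndexError: some point whose
-- comparison chain reaches a missing area_limit index (every point heads some permutation,
-- so one risky point suffices for A to raise).
def Pre_generate_algorithmic_with_limit (points : List (Int × Int)) (area_limit : List Int) : Prop :=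
  points = [] ∨ points.all (fun p => !pvRisky area_limit p) = true
instance (points : List (Int × Int)) (area_limit : List Int) : Decidable (Pre_generate_algorithmic_with_limit points area_limit) := by unfold Pre_generate_algorithmic_with_limit; infer_instance

def pvWitness_generate_algorithmic_with_limit : (List (Int × Int)) × List Int :=
  ([(1, 1), (2, 0)], [0, 0, 3, 3])

def Spec_generate_algorithmic_with_limit (points : List (Int × Int)) (area_limit : List Int) (out : List (List (Int × Int))) : Prop := out = generate_algorithmic_with_limit_alt points area_limit
instance (points : List (Int × Int)) (area_limit : List Int) (out : List (List (Int × Int))) : Decidable (Spec_generate_algorithmic_with_limit points area_limit out) := by unfold Spec_generate_algorithmic_with_limit; infer_instance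

-- ===== CLAIM (what is proved, stated in full; the proofs are below) =====
def Claim_equal_generate_algorithmic_with_limit : Prop := ∀ (points : List (Int × Int)) (area_limit : List Int), Dom_generate_algorithmic_with_limit points area_limit → Pre_generate_algorithmic_with_limit points area_limit → Spec_generate_algorithmic_with_limit points area_limit (generate_algorithmic_with_limit points area_limit)

-- ===== LEMMAS AND PROOFS =====

theorem pvInRect_eq (area_limit : List Int) : pvInRectB area_limit = pvInRectA area_limit := rfl

theorem pvValidPath_eq_all (path : List (Int × Int)) (area_limit : List Int) :
    pvValidPath path area_limit = path.all (pvInRectA area_limit) := by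
  induction path with
  | nil => rfl
  | cons p rest ih =>
      simp only [pvValidPath, List.all_cons]
      by_cases h : pvInRectA area_limit p = true <;> simp [h, ih]

-- proof-only helper: the tree of permutations in A's lexicographic-by-index order
def pvPerms (xs : List (Int × Int)) : List (List (Int × Int)) :=
  if _h : xs.length = 0 then [[]]
  else
    (List.range xs.length).attach.flatMap
      (fun i =>
        (pvPerms (xs.take i.1 ++ xs.drop (i.1 + 1))).map
          (fun t => xs[i.1]'(by have := i.2; simpa [List.mem_range] using this) :: t))
termination_by xs.length
decreasing_by
  have hi : i.1 < xs.length := by have := i.2; simpa [List.mem_range] using this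
  simp only [List.length_append, List.length_take, List.length_drop]
  omega

theorem pvFoldl_eq_flatMap {α β : Type} (l : List α) (f : List β → α → List β) (g : α → List β)
    (h : ∀ (acc : List β) (x : α), x ∈ l → f acc x = acc ++ g x) (acc : List β) :
    l.foldl f acc = acc ++ l.flatMap g := by
  induction l generalizing acc with
  | nil => simp
  | cons y ys ih =>
      simp only [List.foldl_cons, List.flatMap_cons]
      rw [h acc y (by simp), ih (fun a x hx => h a x (by simp [hx]))]
      simp

theorem pvFilter_flatMap {α β : Type} (l : List α) (g : α → List β) (p : β → Bool) :
    (l.flatMap g).filter p = l.flatMap (fun x => (g x).filter p) := by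
  induction l with
  | nil => rfl
  | cons y ys ih => simp [List.flatMap_cons, List.filter_append, ih]

theorem pvFlatMap_congr {α β : Type} (l : List α) (f g : α → List β)
    (h : ∀ x ∈ l, f x = g x) : l.flatMap f = l.flatMap g := by
  induction l with
  | nil => rfl
  | cons y ys ih =>
      simp only [List.flatMap_cons]
      rw [h y (by simp), ih (fun x hx => h x (by simp [hx]))]

theorem pvPerms_perm : ∀ (n : ℕ) (xs : List (Int × Int)), xs.length = n →
    ∀ t ∈ pvPerms xs, t.Perm xs := by
  intro n
  induction n using Nat.strong_induction_on with
  | _ n ih =>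
    intro xs hn t ht
    rw [pvPerms] at ht
    split_ifs at ht with h0
    · have hxs : xs = [] := List.length_eq_zero_iff.mp h0
      simp at ht
      subst hxs; subst ht; exact List.Perm.refl _
    · simp only [List.mem_flatMap, List.mem_attach, List.mem_map, true_and] at ht
      obtain ⟨⟨i, hiR⟩, t', ht', rfl⟩ := ht
      have hi : i < xs.length := by simpa [List.mem_range] using hiR
      have hlen : (xs.take i ++ xs.drop (i + 1)).length = n - 1 := by
        simp only [List.length_append, List.length_take, List.length_drop]; omega
      have hperm' : t'.Perm (xs.take i ++ xs.drop (i + 1)) :=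
        ih (n - 1) (by omega) _ hlen t' ht'
      have hsplit : xs.take i ++ xs[i] :: xs.drop (i + 1) = xs := by
        conv_rhs => rw [← List.take_append_drop i xs]
        rw [List.drop_eq_getElem_cons hi]
      have h1 : (xs[i] :: t').Perm (xs[i] :: (xs.take i ++ xs.drop (i + 1))) :=
        hperm'.cons _
      have h2 : (xs[i] :: (xs.take i ++ xs.drop (i + 1))).Perm
          (xs.take i ++ xs[i] :: xs.drop (i + 1)) := List.perm_middle.symm
      rw [hsplit] at h2
      exact h1.trans h2

-- the central invariant: A's recursion returns acc ++ the valid extensions of current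
theorem pvGenA_eq (area_limit : List Int) : ∀ (n : ℕ) (remaining : List (Int × Int)),
    remaining.length = n → ∀ (current : List (Int × Int)) (acc : List (List (Int × Int))),
    pvGenA area_limit current remaining acc =
      acc ++ ((pvPerms remaining).map (fun t => current ++ t)).filter
        (fun path => pvValidPath path area_limit) := by
  intro n
  induction n using Nat.strong_induction_on with
  | _ n ih =>
    intro remaining hn current acc
    by_cases h0 : remaining.length = 0
    · have : remaining = [] := List.length_eq_zero_iff.mp h0
      subst this
      rw [pvGenA, pvPerms]
      by_cases hv : pvValidPath current area_limit = true <;> simp [hv]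
    · rw [pvGenA, pvPerms, dif_neg h0, dif_neg h0]
      rw [pvFoldl_eq_flatMap _ _
        (fun i : {x // x ∈ List.range remaining.length} =>
          ((pvPerms (remaining.take i.1 ++ remaining.drop (i.1 + 1))).map
            (fun t => (current ++
              [remaining[i.1]'(by have := i.2; simpa [List.mem_range] using this)]) ++ t)).filter
            (fun path => pvValidPath path area_limit))]
      · rw [List.map_flatMap, pvFilter_flatMap]
        congr 1
        apply pvFlatMap_congr
        intro i _
        rw [List.map_map]
        congr 1
        apply List.map_congr_left
        intro t _
        simp only [Function.comp_apply, List.append_assoc, List.singleton_append]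
      · intro a i _
        have hi : i.1 < remaining.length := by have := i.2; simpa [List.mem_range] using this
        have hlen : (remaining.take i.1 ++ remaining.drop (i.1 + 1)).length = n - 1 := by
          simp only [List.length_append, List.length_take, List.length_drop]; omega
        exact ih (n - 1) (by omega) _ hlen _ a

-- ===== connecting pvPerms with B's factorial-number-system decoding =====

theorem pvFact_pos (n : ℕ) : 0 < pvFact n := by
  induction n with
  | zero => simp [pvFact]
  | succ i ih => simp [pvFact]; positivity

theorem pvDecode_append : ∀ (i : ℕ) (r : ℕ) (pool perm : List (Int × Int)),
    pvDecode i r pool perm = perm ++ pvDecode i r pool [] := by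
  intro i
  induction i with
  | zero => intro r pool perm; simp [pvDecode]
  | succ i ih =>
      intro r pool perm
      simp only [pvDecode]
      cases h : PySem.List.pop? pool ((r / pvFact i : ℕ) : Int) with
      | none => simp
      | some res =>
          obtain ⟨x, pool'⟩ := res
          simp only [List.nil_append]
          rw [ih _ _ (perm ++ [x]), ih _ _ [x]]
          simp

theorem pvAttach_flatMap {α β : Type} (l : List α) (g : α → List β) :
    l.flatMap g = l.attach.flatMap (fun x => g x.1) := by
  conv_lhs => rw [← List.attach_map_subtype_val l]
  rw [List.flatMap_map]

theorem pvRange_mul (a b : ℕ) :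
    List.range (b * a) = (List.range b).flatMap (fun q => (List.range a).map (fun r => q * a + r)) := by
  induction b with
  | zero => simp
  | succ b ih =>
      rw [Nat.succ_mul, List.range_add, ih, List.range_succ, List.flatMap_append]
      simp

theorem pvPerms_eq_decode : ∀ (n : ℕ) (xs : List (Int × Int)), xs.length = n →
    (List.range (pvFact n)).map (fun k => pvDecode n k xs []) = pvPerms xs := by
  intro n
  induction n with
  | zero =>
      intro xs h
      have : xs = [] := List.length_eq_zero_iff.mp h
      subst this
      simp [pvFact, pvDecode, pvPerms, List.range_succ]
  | succ m ih =>
      intro xs h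
      rw [pvPerms, dif_neg (by omega)]
      have hfact : pvFact (m + 1) = xs.length * pvFact m := by
        rw [h]; simp [pvFact, Nat.mul_comm]
      rw [hfact, pvRange_mul, List.map_flatMap,
        pvAttach_flatMap (List.range xs.length)]
      apply pvFlatMap_congr
      intro qq _
      obtain ⟨q, hq⟩ := qq
      have hqlen : q < xs.length := by simpa [List.mem_range] using hq
      simp only
      have hpop : PySem.List.pop? xs ((q : ℕ) : Int) =
          some (xs[q], xs.eraseIdx q) := PySem.List.pop?_natCast xs q hqlen
      have herase : xs.eraseIdx q = xs.take q ++ xs.drop (q + 1) := by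
        rw [List.eraseIdx_eq_take_drop_succ]
      calc ((List.range (pvFact m)).map (fun r => q * pvFact m + r)).map
            (fun k => pvDecode (m + 1) k xs [])
          = (List.range (pvFact m)).map
            (fun r => xs[q] :: pvDecode m r (xs.take q ++ xs.drop (q + 1)) []) := by
            rw [List.map_map]
            apply List.map_congr_left
            intro r hr
            have hr' : r < pvFact m := by simpa [List.mem_range] using hr
            have hdiv : (q * pvFact m + r) / pvFact m = q := by
              rw [Nat.mul_comm q (pvFact m), Nat.mul_add_div (pvFact_pos m),
                Nat.div_eq_of_lt hr']
              omega
            have hmod : (q * pvFact m + r) % pvFact m = r := by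
              rw [Nat.mul_comm q (pvFact m), Nat.mul_add_mod]
              exact Nat.mod_eq_of_lt hr'
            simp only [Function.comp_apply, pvDecode, hdiv, hmod, hpop]
            rw [pvDecode_append, herase]
            simp
        _ = ((List.range (pvFact m)).map
              (fun r => pvDecode m r (xs.take q ++ xs.drop (q + 1)) [])).map
              (fun t => xs[q] :: t) := by rw [List.map_map]; rfl
        _ = (pvPerms (xs.take q ++ xs.drop (q + 1))).map (fun t => xs[q] :: t) := by
            rw [ih (xs.take q ++ xs.drop (q + 1))
              (by simp only [List.length_append, List.length_take, List.length_drop]; omega)]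

theorem pvAgree (points : List (Int × Int)) (area_limit : List Int) :
    generate_algorithmic_with_limit points area_limit =
      generate_algorithmic_with_limit_alt points area_limit := by
  unfold generate_algorithmic_with_limit generate_algorithmic_with_limit_alt
  rw [pvGenA_eq area_limit points.length points rfl [] [],
    pvPerms_eq_decode points.length points rfl]
  simp only [List.nil_append, List.map_id', pvInRect_eq]
  have hval : ∀ t ∈ pvPerms points,
      pvValidPath t area_limit = points.all (pvInRectA area_limit) := by
    intro t ht
    have hperm := pvPerms_perm points.length points rfl t ht
    rw [pvValidPath_eq_all]
    by_cases hall : points.all (pvInRectA area_limit) = true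
    · simp only [hall]
      rw [List.all_eq_true] at hall ⊢
      intro x hx
      exact hall x (hperm.mem_iff.mp hx)
    · simp only [Bool.not_eq_true] at hall
      rw [hall]
      rw [List.all_eq_false] at hall
      obtain ⟨x, hx, hpx⟩ := hall
      rw [List.all_eq_false]
      exact ⟨x, hperm.mem_iff.mpr hx, hpx⟩
  by_cases hall : points.all (pvInRectA area_limit) = true
  · rw [if_pos hall]
    apply List.filter_eq_self.mpr
    intro t ht
    rw [hval t ht, hall]
  · rw [if_neg hall]
    apply List.filter_eq_nil_iff.mpr
    intro t ht
    rw [hval t ht]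
    simpa using hall

-- ===== VERDICT (by name: the statement is the Claim_ definition above) =====
theorem generate_algorithmic_with_limit_spec : Claim_equal_generate_algorithmic_with_limit := by
  intro points area_limit _ _
  exact pvAgree points area_limit
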